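-- pv_equiv track=rewrite | github.com/princetonafeezx/Categorizer | categorizer.py | _tokens_have_consecutive_phrase
-- ===== SOURCE A (Python) =====
-- def _tokens_have_consecutive_phrase(merchant_tokens: list[str], rule: str) -> bool:
--     # Split the rule into its own tokens
--     rule_tokens = rule.split()
--     # If rule is empty, no match
--     if not rule_tokens:
--         return False
--     # If rule is a single word, check if it's in the merchant list
--     if len(rule_tokens) == 1:
--         return rule_tokens[0] in merchant_tokens
--     m, r = len(merchant_tokens), len(rule_tokens)
--     # If rule is longer than the merchant string, it can't be a sub-phrase
--     if r > m:
--         return False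
--     # Use a sliding window to check for the consecutive sequence of tokens
--     for i in range(m - r + 1):
--         if merchant_tokens[i : i + r] == rule_tokens:
--             return True
--     return False
-- ===== SOURCE B (Python) =====
-- def _tokens_have_consecutive_phrase(merchant_tokens: list[str], rule: str) -> bool:
--     rule_tokens = rule.split()
--     if not rule_tokens:
--         return False
--     r = len(rule_tokens)
--     m = len(merchant_tokens)
--     # Build a position index of the merchant tokens once.
--     positions = {}
--     for i, tok in enumerate(merchant_tokens):
--         positions.setdefault(tok, []).append(i)
--     # Verify the rest of the phrase only at positions where its first token occurs.
--     for i in positions.get(rule_tokens[0], []):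
--         if i + r <= m and all(merchant_tokens[i + j] == rule_tokens[j] for j in range(1, r)):
--             return True
--     return False
-- ===== Notes on version B (the rewrite author's own statement) =====
-- stated objective: alternative
-- what changed: Replaces A's sliding window that slice-compares the whole rule at every offset by a token->positions hash index built in one pass, verifying the remaining rule tokens only at the offsets where the first rule token actually occurs.
import Mathlib
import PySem

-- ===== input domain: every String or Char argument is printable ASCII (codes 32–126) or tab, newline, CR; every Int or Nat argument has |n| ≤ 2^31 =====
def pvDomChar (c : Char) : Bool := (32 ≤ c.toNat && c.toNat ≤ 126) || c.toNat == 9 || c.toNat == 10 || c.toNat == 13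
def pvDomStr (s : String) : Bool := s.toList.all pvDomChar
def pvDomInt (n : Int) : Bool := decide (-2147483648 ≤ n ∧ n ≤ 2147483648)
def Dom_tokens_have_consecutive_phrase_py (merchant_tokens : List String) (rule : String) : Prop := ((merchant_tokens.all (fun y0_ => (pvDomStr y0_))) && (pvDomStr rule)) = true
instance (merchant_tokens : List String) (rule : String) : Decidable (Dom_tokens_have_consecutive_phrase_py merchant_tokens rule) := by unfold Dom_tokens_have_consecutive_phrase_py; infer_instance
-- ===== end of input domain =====

-- B replaces A's slice-comparing sliding window by a token->positions index built in one pass,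
-- verifying the rule only at positions of its first token (objective: alternative; no speed claim).

-- ===== PORT A =====
def tokens_have_consecutive_phrase_py (merchant_tokens : List String) (rule : String) : Bool :=
  -- rule_tokens = rule.split()
  let rule_tokens := PySem.Str.split₀ rule
  -- if not rule_tokens: return False
  if rule_tokens.isEmpty then false
  -- if len(rule_tokens) == 1: return rule_tokens[0] in merchant_tokens
  else if rule_tokens.length = 1 then
    merchant_tokens.contains (PySem.List.pyGetD rule_tokens 0 "")
  else
    let m : Int := merchant_tokens.length
    let r : Int := rule_tokens.length
    -- if r > m: return False
    if r > m then false
    -- for i in range(m - r + 1): if merchant_tokens[i:i+r] == rule_tokens: return True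
    else
      (PySem.List.pyRange 0 (m - r + 1) 1).any
        (fun i => PySem.List.slice merchant_tokens (some i) (some (i + r)) == rule_tokens)

-- ===== PORT B =====
def tokens_have_consecutive_phrase_py_alt (merchant_tokens : List String) (rule : String) : Bool :=
  let rule_tokens := PySem.Str.split₀ rule
  if rule_tokens.isEmpty then false
  else
    let r : Int := rule_tokens.length
    let m : Int := merchant_tokens.length
    -- positions = {}; for i, tok in enumerate(merchant_tokens): positions.setdefault(tok, []).append(i)
    let positions : PySem.Dict String (List Int) :=
      (PySem.List.enumerate merchant_tokens 0).foldl
        (fun d p => d.modify p.2 [] (fun v => v ++ [p.1])) PySem.Dict.empty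
    -- for i in positions.get(rule_tokens[0], []):
    --   if i + r <= m and all(merchant_tokens[i+j] == rule_tokens[j] for j in range(1, r)): return True
    (positions.getD (PySem.List.pyGetD rule_tokens 0 "") []).any (fun i =>
      decide (i + r ≤ m) &&
      (PySem.List.pyRange 1 r 1).all (fun j =>
        PySem.List.pyGetD merchant_tokens (i + j) "" == PySem.List.pyGetD rule_tokens j ""))

-- ===== PRECONDITION & SPEC =====
def Spec_tokens_have_consecutive_phrase_py (merchant_tokens : List String) (rule : String) (out : Bool) : Prop := out = tokens_have_consecutive_phrase_py_alt merchant_tokens rule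
instance (merchant_tokens : List String) (rule : String) (out : Bool) : Decidable (Spec_tokens_have_consecutive_phrase_py merchant_tokens rule out) := by unfold Spec_tokens_have_consecutive_phrase_py; infer_instance

-- ===== CLAIM (what is proved, stated in full; the proofs are below) =====
def Claim_equal_tokens_have_consecutive_phrase_py : Prop := ∀ (merchant_tokens : List String) (rule : String), Dom_tokens_have_consecutive_phrase_py merchant_tokens rule → Spec_tokens_have_consecutive_phrase_py merchant_tokens rule (tokens_have_consecutive_phrase_py merchant_tokens rule)

-- ===== LEMMAS AND PROOFS =====

-- the sliding-window loop of A finds exactly the infixes (for 1 ≤ r)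
theorem window_iff (ms rt : List String) (hr : 1 ≤ rt.length) :
    ((PySem.List.pyRange 0 ((ms.length : Int) - (rt.length : Int) + 1) 1).any
        (fun i => PySem.List.slice ms (some i) (some (i + (rt.length : Int))) == rt)) = true ↔
      rt <:+: ms := by
  rw [List.any_eq_true]
  constructor
  · rintro ⟨i, hmem, hslice⟩
    rw [PySem.List.mem_pyRange_one] at hmem
    obtain ⟨h0, hlt⟩ := hmem
    rw [beq_iff_eq] at hslice
    rw [PySem.List.slice_toNat] at hslice
    have htn : (i + (rt.length : Int)).toNat - i.toNat = rt.length := by omega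
    rw [htn] at hslice
    calc rt = (ms.drop i.toNat).take rt.length := hslice.symm
      _ <:+: ms := ((List.take_prefix _ _).isInfix.trans (List.drop_suffix _ _).isInfix)
    omega
    omega
  · intro hi
    obtain ⟨s, t2, hms⟩ := hi
    refine ⟨(s.length : Int), ?_, ?_⟩
    · rw [PySem.List.mem_pyRange_one]
      have : ms.length = s.length + rt.length + t2.length := by
        rw [← hms]; simp; omega
      omega
    · rw [beq_iff_eq, PySem.List.slice_natCast_add, ← hms]
      rw [List.append_assoc, List.drop_left, List.take_left]

theorem A_iff (ms : List String) (rule : String) :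
    tokens_have_consecutive_phrase_py ms rule = true ↔
      (PySem.Str.split₀ rule ≠ [] ∧ PySem.Str.split₀ rule <:+: ms) := by
  cases hrt : PySem.Str.split₀ rule with
  | nil => simp [tokens_have_consecutive_phrase_py, hrt]
  | cons w ws =>
    by_cases h1 : ws = []
    · subst h1
      simp [tokens_have_consecutive_phrase_py, hrt, PySem.List.pyGetD,
        List.singleton_infix_iff]
    · have hlen : (w :: ws).length ≠ 1 := by simpa using h1
      by_cases h2 : ((w :: ws).length : Int) > (ms.length : Int)
      · have hB : ¬ ((w :: ws) <:+: ms) := by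
          intro hi
          have := hi.length_le
          omega
        simp only [tokens_have_consecutive_phrase_py, hrt, List.isEmpty_cons,
          Bool.false_eq_true, if_false, if_neg hlen, if_pos h2]
        simp [hB]
      · have hw := window_iff ms (w :: ws) (by simp)
        simp only [tokens_have_consecutive_phrase_py, hrt, List.isEmpty_cons,
          Bool.false_eq_true, if_false, hlen, if_neg h2]
        rw [hw]
        simp

-- B's position index: the list stored under a key is exactly the offsets of that token
theorem candidates_eq (ms : List String) (first : String) :
    ((PySem.List.enumerate ms 0).foldl
        (fun d p => d.modify p.2 [] (fun v => v ++ [p.1])) PySem.Dict.empty).getD first []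
      = ((PySem.List.enumerate ms 0).filter (fun p => p.2 == first)).map (·.1) := by
  have hswap : (fun (d : PySem.Dict String (List Int)) (p : Int × String) =>
      d.modify p.2 [] (fun v => v ++ [p.1]))
    = (fun d p => (fun (d : PySem.Dict String (List Int)) (q : String × Int) =>
        d.modify q.1 [] (fun v => v ++ [q.2])) d (Prod.swap p)) := rfl
  rw [hswap, ← List.foldl_map (f := Prod.swap)
    (g := fun (d : PySem.Dict String (List Int)) (q : String × Int) =>
      d.modify q.1 [] (fun v => v ++ [q.2])), PySem.Dict.getD_foldl_modify_append]
  simp [List.filter_map, Function.comp_def]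

theorem mem_candidates (ms : List String) (first : String) (i : Int) :
    i ∈ ((PySem.List.enumerate ms 0).filter (fun p => p.2 == first)).map (·.1) ↔
      ∃ k : Nat, k < ms.length ∧ i = (k : Int) ∧ ms[k]? = some first := by
  simp only [List.mem_map, List.mem_filter, PySem.List.mem_enumerate_iff]
  constructor
  · rintro ⟨⟨j, tok⟩, ⟨⟨k, hk, hpq⟩, hf⟩, hi⟩
    simp only [Prod.mk.injEq] at hpq
    obtain ⟨h1, h2⟩ := hpq
    refine ⟨k, hk, ?_, ?_⟩
    · simp only at hi h1; omega
    · simp only [beq_iff_eq] at hf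
      rw [List.getElem?_eq_getElem hk, ← h2, hf]
  · rintro ⟨k, hk, hi, hms⟩
    refine ⟨((k : Int), first), ⟨⟨k, hk, ?_⟩, by simp⟩, by simpa using hi.symm⟩
    rw [List.getElem?_eq_getElem hk] at hms
    simp [Option.some.inj hms]

-- B equals "the rule tokens form a nonempty infix of the merchant tokens"
theorem alt_iff (ms : List String) (rule : String) :
    tokens_have_consecutive_phrase_py_alt ms rule = true ↔
      (PySem.Str.split₀ rule ≠ [] ∧ PySem.Str.split₀ rule <:+: ms) := by
  cases hrt : PySem.Str.split₀ rule with
  | nil => simp [tokens_have_consecutive_phrase_py_alt, hrt]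
  | cons w ws =>
    have hfirst : PySem.List.pyGetD (w :: ws) 0 "" = w := PySem.List.pyGetD_zero_cons w ws ""
    simp only [tokens_have_consecutive_phrase_py_alt, hrt, List.isEmpty_cons,
      Bool.false_eq_true, if_false, hfirst, ne_eq, reduceCtorEq, not_false_eq_true, true_and]
    rw [candidates_eq, List.any_eq_true]
    constructor
    · rintro ⟨i, hmem, hchk⟩
      rw [mem_candidates] at hmem
      obtain ⟨k, hk, hik, hmsw⟩ := hmem
      subst hik
      rw [Bool.and_eq_true, decide_eq_true_eq, List.all_eq_true] at hchk
      obtain ⟨hle, hall⟩ := hchk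
      have hlen : k + (w :: ws).length ≤ ms.length := by
        exact_mod_cast (by omega : ((k:Int) + (w :: ws).length ≤ (ms.length:Int)))
      have hpre : (w :: ws) <+: ms.drop k := by
        rw [List.prefix_iff_getElem?]
        intro jn hjn
        rw [List.getElem?_drop]
        cases jn with
        | zero => simpa using hmsw
        | succ n =>
          have hjr : ((n + 1 : Nat) : Int) ∈ PySem.List.pyRange 1 ((w :: ws).length : Int) 1 := by
            rw [PySem.List.mem_pyRange_one]
            constructor <;> [omega; exact_mod_cast (by omega : (n + 1 : Nat) < (w :: ws).length)]
          have hthis := hall _ hjr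
          rw [beq_iff_eq] at hthis
          have hb1 : k + (n + 1) < ms.length := by omega
          rw [show (k : Int) + ((n + 1 : Nat) : Int) = ((k + (n + 1) : Nat) : Int) by push_cast; ring,
            PySem.List.pyGetD_natCast, PySem.List.pyGetD_natCast] at hthis
          rw [List.getElem?_eq_getElem hb1]
          rw [List.getD_eq_getElem _ _ hb1, List.getD_eq_getElem _ _ hjn] at hthis
          exact congrArg some hthis
      exact hpre.isInfix.trans (List.drop_suffix k ms).isInfix
    · intro hi
      obtain ⟨s, t2, hms⟩ := hi
      subst hms
      have hmslen : (s ++ w :: ws ++ t2).length = s.length + (w :: ws).length + t2.length := by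
        simp
        omega
      have hks : s.length < (s ++ w :: ws ++ t2).length := by simp
      refine ⟨(s.length : Int), ?_, ?_⟩
      · rw [mem_candidates]
        refine ⟨s.length, hks, rfl, ?_⟩
        rw [List.getElem?_eq_getElem hks,
          List.getElem_append_left (by simp : s.length < (s ++ w :: ws).length),
          List.getElem_append_right (le_refl s.length)]
        simp
      · rw [Bool.and_eq_true, decide_eq_true_eq, List.all_eq_true]
        refine ⟨by simp, ?_⟩
        intro j hj
        rw [PySem.List.mem_pyRange_one] at hj
        obtain ⟨hj1, hj2⟩ := hj
        have hjn : j = ((j.toNat : Nat) : Int) := by omega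
        have hjnr : j.toNat < (w :: ws).length := by
          simp only [List.length_cons] at hj2 ⊢
          omega
        simp only [List.length_cons] at hjnr
        have hb1 : s.length + j.toNat < (s ++ w :: ws ++ t2).length := by
          rw [hmslen]; simp only [List.length_cons]; omega
        rw [beq_iff_eq, hjn,
          show (s.length : Int) + ((j.toNat : Nat) : Int) = ((s.length + j.toNat : Nat) : Int) by push_cast; ring,
          PySem.List.pyGetD_natCast, PySem.List.pyGetD_natCast,
          List.getD_eq_getElem _ _ hb1, List.getD_eq_getElem _ _ hjnr]
        rw [List.getElem_append_left (by simp only [List.length_append, List.length_cons]; omega : s.length + j.toNat < (s ++ w :: ws).length),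
          List.getElem_append_right (by omega : s.length ≤ s.length + j.toNat)]
        congr 1
        omega

-- ===== VERDICT (by name: the statement is the Claim_ definition above) =====
theorem tokens_have_consecutive_phrase_py_spec : Claim_equal_tokens_have_consecutive_phrase_py := by
  intro ms rule _
  unfold Spec_tokens_have_consecutive_phrase_py
  rw [Bool.eq_iff_iff, A_iff, alt_iff]
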